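-- pv_equiv track=rewrite | github.com/shreyas-09/Nyay-Track-SC | pages/current_case.py | convert_bullets_to_html
-- ===== SOURCE A (Python) =====
-- def convert_bullets_to_html(text):
--     lines = text.split("\n")
--     html_lines = []
--     in_list = False
--
--     for line in lines:
--         if line.startswith("* "):
--             if not in_list:
--                 html_lines.append("<ul>")
--                 in_list = True
--             line_content = line[2:]
--             html_lines.append(f"<li>{line_content}</li>")
--         else:
--             if in_list:
--                 html_lines.append("</ul>")
--                 in_list = False
--             html_lines.append(line)
--
--     if in_list:
--         html_lines.append("</ul>")
--
--     return "\n".join(html_lines)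
-- ===== SOURCE B (Python) =====
-- def convert_bullets_to_html(text):
--     lines = text.split("\n")
--     out = []
--     i = 0
--     n = len(lines)
--     while i < n:
--         if lines[i].startswith("* "):
--             j = i
--             while j < n and lines[j].startswith("* "):
--                 j += 1
--             out.append("<ul>")
--             out.extend("<li>" + l[2:] + "</li>" for l in lines[i:j])
--             out.append("</ul>")
--             i = j
--         else:
--             out.append(lines[i])
--             i += 1
--     return "\n".join(out)
-- ===== Notes on version B (the rewrite author's own statement) =====
-- stated objective: alternative
-- what changed: Replaces the line-by-line in_list flag machine with a run-scanning loop that finds each maximal run of consecutive bullet lines and emits the whole <ul>...</ul> block at once.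
import Mathlib
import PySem

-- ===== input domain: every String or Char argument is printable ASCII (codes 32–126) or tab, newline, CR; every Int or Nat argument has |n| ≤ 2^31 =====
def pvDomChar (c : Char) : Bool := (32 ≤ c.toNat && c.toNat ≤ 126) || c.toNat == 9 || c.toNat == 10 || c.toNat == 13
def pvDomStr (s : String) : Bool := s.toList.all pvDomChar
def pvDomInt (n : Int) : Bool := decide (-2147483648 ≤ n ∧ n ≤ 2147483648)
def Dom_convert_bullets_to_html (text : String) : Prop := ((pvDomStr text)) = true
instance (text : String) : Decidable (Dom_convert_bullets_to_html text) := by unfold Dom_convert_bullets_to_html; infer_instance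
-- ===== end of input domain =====

-- B differs from A by emitting whole maximal bullet runs instead of tracking an in_list flag; same output, same cost (objective: alternative).

-- ===== PORT A =====
-- A's loop body: one step of the fold over (html_lines, in_list)
def pvStepA (st : List (List Char) × Bool) (line : List Char) : List (List Char) × Bool :=
  if PySem.Chars.startswith line "* ".toList then
    ((if st.2 then st.1 else st.1 ++ ["<ul>".toList]) ++
      ["<li>".toList ++ PySem.List.slice line (some 2) none ++ "</li>".toList], true)
  else
    ((if st.2 then st.1 ++ ["</ul>".toList] else st.1) ++ [line], false)

def convert_bullets_to_html (text : String) : String :=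
  let lines := PySem.Chars.splitOn text.toList "\n".toList
  let st := lines.foldl pvStepA ([], false)
  let html_lines := if st.2 then st.1 ++ ["</ul>".toList] else st.1
  String.ofList (PySem.Chars.join "\n".toList html_lines)

-- ===== PORT B =====
def pvPredB (l : List Char) : Bool := PySem.Chars.startswith l "* ".toList

def pvLiB (l : List Char) : List Char :=
  "<li>".toList ++ PySem.List.slice l (some 2) none ++ "</li>".toList

-- B's outer loop: consume either one maximal bullet run or one plain line per step
def pvRunB : List (List Char) → List (List Char)
  | [] => []
  | l :: ls =>
    if pvPredB l then
      "<ul>".toList :: (List.takeWhile pvPredB (l :: ls)).map pvLiB ++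
        "</ul>".toList :: pvRunB (List.dropWhile pvPredB ls)
    else
      l :: pvRunB ls
termination_by ls => ls.length
decreasing_by
  · simpa using Nat.lt_succ_of_le (List.length_dropWhile_le pvPredB ls)
  · simp

def convert_bullets_to_html_alt (text : String) : String :=
  String.ofList (PySem.Chars.join "\n".toList (pvRunB (PySem.Chars.splitOn text.toList "\n".toList)))

-- ===== PRECONDITION & SPEC =====
def Spec_convert_bullets_to_html (text : String) (out : String) : Prop := out = convert_bullets_to_html_alt text
instance (text : String) (out : String) : Decidable (Spec_convert_bullets_to_html text out) := by unfold Spec_convert_bullets_to_html; infer_instance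

-- ===== CLAIM (what is proved, stated in full; the proofs are below) =====
def Claim_equal_convert_bullets_to_html : Prop := ∀ (text : String), Dom_convert_bullets_to_html text → Spec_convert_bullets_to_html text (convert_bullets_to_html text)

-- ===== LEMMAS AND PROOFS =====

-- A's remaining output from in_list state inl, with the trailing close included
def pvRunA : List (List Char) → Bool → List (List Char)
  | [], inl => if inl then ["</ul>".toList] else []
  | l :: ls, inl =>
    if pvPredB l then
      (if inl then [] else ["<ul>".toList]) ++ [pvLiB l] ++ pvRunA ls true
    else
      (if inl then ["</ul>".toList] else []) ++ [l] ++ pvRunA ls false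

lemma pvFoldA_eq (ls : List (List Char)) : ∀ (acc : List (List Char)) (inl : Bool),
    (if (ls.foldl pvStepA (acc, inl)).2 then (ls.foldl pvStepA (acc, inl)).1 ++ ["</ul>".toList]
     else (ls.foldl pvStepA (acc, inl)).1) = acc ++ pvRunA ls inl := by
  induction ls with
  | nil => intro acc inl; cases inl <;> simp [pvRunA]
  | cons l ls ih =>
    intro acc inl
    rw [List.foldl_cons]
    by_cases h : PySem.Chars.startswith l ['*', ' '] = true
    · have hb : pvPredB l = true := by simpa [pvPredB] using h
      rw [show pvStepA (acc, inl) l =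
          ((if inl then acc else acc ++ ["<ul>".toList]) ++
            ["<li>".toList ++ PySem.List.slice l (some 2) none ++ "</li>".toList], true) from by
        simp [pvStepA, h]]
      rw [ih]
      cases inl <;> simp [pvRunA, hb, pvLiB]
    · have h2 : PySem.Chars.startswith l ['*', ' '] = false := by simpa using h
      have hb : pvPredB l = false := by simpa [pvPredB] using h2
      rw [show pvStepA (acc, inl) l =
          ((if inl then acc ++ ["</ul>".toList] else acc) ++ [l], false) from by
        simp [pvStepA, h2]]
      rw [ih]
      cases inl <;> simp [pvRunA, hb]

lemma pvRunA_eq (ls : List (List Char)) :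
    (pvRunA ls true = (ls.takeWhile pvPredB).map pvLiB ++
        "</ul>".toList :: pvRunB (ls.dropWhile pvPredB)) ∧
    pvRunA ls false = pvRunB ls := by
  induction ls with
  | nil => constructor <;> rw [pvRunB.eq_def] <;> simp [pvRunA]
  | cons l ls ih =>
    by_cases h : pvPredB l = true
    · constructor
      · simp [pvRunA, h, ih.1]
      · rw [pvRunB.eq_def]
        simp [pvRunA, h, ih.1]
    · constructor
      · rw [pvRunB.eq_def]
        simp [pvRunA, h, ih.2]
      · rw [pvRunB.eq_def]
        simp [pvRunA, h, ih.2]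

-- ===== VERDICT (by name: the statement is the Claim_ definition above) =====
theorem convert_bullets_to_html_spec : Claim_equal_convert_bullets_to_html := by
  intro text _
  unfold Spec_convert_bullets_to_html convert_bullets_to_html convert_bullets_to_html_alt
  have h := pvFoldA_eq (PySem.Chars.splitOn text.toList "\n".toList) [] false
  simp only [h, List.nil_append, (pvRunA_eq _).2]
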